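-- pv_equiv track=rewrite | github.com/docongban/ecommerce-semantic-web-advise | MultiAgent1/main_v1.py | analyze_question_product
-- ===== SOURCE A (Python) =====
-- def analyze_question_product(question):
--     keyword_category = ["apple", "iphone", "samsung", "oppo", "xiaomi", "vivo", "realme", "nokia",
--                         "galaxy", "pro", "plus", "128gb", "256gb", "512gb", "1tb", "note", "max",
--                         "redmi", "find", "reno", "flip", "fold", "mini"]
--
--     words = question.lower().split()
--     first_index = float('inf')
--     last_index = -1
--     for i, word in enumerate(words):
--         if word in keyword_category:
--             first_index = min(first_index, i)
--             last_index = max(last_index, i)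
--
--     if first_index == float('inf'):
--         return []
--     result = words[first_index:last_index + 1]
--
--     return result
-- ===== SOURCE B (Python) =====
-- def analyze_question_product(question):
--     keyword_category = ["apple", "iphone", "samsung", "oppo", "xiaomi", "vivo", "realme", "nokia",
--                         "galaxy", "pro", "plus", "128gb", "256gb", "512gb", "1tb", "note", "max",
--                         "redmi", "find", "reno", "flip", "fold", "mini"]
--
--     words = question.lower().split()
--     first = next((i for i, w in enumerate(words) if w in keyword_category), None)
--     if first is None:
--         return []
--     last = len(words) - 1 - next(i for i, w in enumerate(reversed(words)) if w in keyword_category)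
--     return words[first:last + 1]
-- ===== Notes on version B (the rewrite author's own statement) =====
-- stated objective: idiomatic
-- what changed: Replaces the single pass that maintains min/max accumulators over every match with two early-exit directional scans: a forward generator for the first keyword index and a reverse generator for the last, then one slice.
import Mathlib
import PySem

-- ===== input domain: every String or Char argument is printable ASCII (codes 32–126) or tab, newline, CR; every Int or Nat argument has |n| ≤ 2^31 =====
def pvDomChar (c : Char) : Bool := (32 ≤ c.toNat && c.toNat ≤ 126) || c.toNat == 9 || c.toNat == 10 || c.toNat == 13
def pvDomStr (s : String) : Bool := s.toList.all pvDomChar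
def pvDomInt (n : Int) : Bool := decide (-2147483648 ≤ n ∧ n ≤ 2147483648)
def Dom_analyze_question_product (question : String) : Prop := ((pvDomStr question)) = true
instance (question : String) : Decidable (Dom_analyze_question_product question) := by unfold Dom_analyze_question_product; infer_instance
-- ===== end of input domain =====

-- B replaces A's single min/max-accumulating pass with two early-exit directional scans
-- (forward for the first keyword index, backward for the last) and one slice; objective: idiomatic.

-- shared data constant: the literal keyword list both Pythons carry
def pvKeywords : List String :=
  ["apple", "iphone", "samsung", "oppo", "xiaomi", "vivo", "realme", "nokia",
   "galaxy", "pro", "plus", "128gb", "256gb", "512gb", "1tb", "note", "max",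
   "redmi", "find", "reno", "flip", "fold", "mini"]

-- ===== PORT A =====
-- one pass over enumerate(words) keeping (first_index, last_index); none plays float('inf')
def analyze_question_product (question : String) : List String :=
  let words := PySem.Str.split₀ (PySem.Str.lower question)
  let st := (PySem.List.enumerate words 0).foldl
    (fun (st : Option Int × Int) iw =>
      if pvKeywords.contains iw.2 then
        ((match st.1 with
          | none => some iw.1
          | some f => some (min f iw.1)), max st.2 iw.1)
      else st) (none, -1)
  match st.1 with
  | none => []
  | some f => PySem.List.slice words (some f) (some (st.2 + 1))

-- ===== PORT B =====
def analyze_question_product_alt (question : String) : List String :=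
  let words := PySem.Str.split₀ (PySem.Str.lower question)
  match words.findIdx? (fun w => pvKeywords.contains w) with
  | none => []
  | some first =>
    let last := words.length - 1 - (words.reverse.findIdx? (fun w => pvKeywords.contains w)).getD 0
    PySem.List.slice words (some (first : Int)) (some ((last : Int) + 1))

-- ===== PRECONDITION & SPEC =====
def Spec_analyze_question_product (question : String) (out : List String) : Prop := out = analyze_question_product_alt question
instance (question : String) (out : List String) : Decidable (Spec_analyze_question_product question out) := by unfold Spec_analyze_question_product; infer_instance

-- ===== CLAIM (what is proved, stated in full; the proofs are below) =====
def Claim_equal_analyze_question_product : Prop := ∀ (question : String), Dom_analyze_question_product question → Spec_analyze_question_product question (analyze_question_product question)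

-- ===== LEMMAS AND PROOFS =====

-- the keyword-membership predicate and A's loop body over an arbitrary word list
def pvP (w : String) : Bool := pvKeywords.contains w

def pvStep (st : Option Int × Int) (iw : Int × String) : Option Int × Int :=
  if pvP iw.2 then
    ((match st.1 with
      | none => some iw.1
      | some f => some (min f iw.1)), max st.2 iw.1)
  else st

theorem pvFindIdx?_lt {α : Type} {p : α → Bool} {xs : List α} {i : Nat}
    (h : List.findIdx? p xs = some i) : i < xs.length :=
  (List.findIdx?_eq_some_iff_getElem.mp h).choose

theorem pvRev_some {α : Type} {p : α → Bool} {xs : List α} {j : Nat}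
    (h : List.findIdx? p xs = some j) : ∃ r, List.findIdx? p xs.reverse = some r := by
  obtain ⟨hlt, hp, -⟩ := List.findIdx?_eq_some_iff_getElem.mp h
  have : (xs.reverse.findIdx? p).isSome = true := by
    rw [List.findIdx?_isSome, List.any_eq_true]
    exact ⟨xs[j], List.mem_reverse.mpr (List.getElem_mem _), hp⟩
  exact Option.isSome_iff_exists.mp this

-- once the first index is found (f ≤ l < s), it is frozen and the last index becomes
-- the last matching index of the remaining suffix (or stays l)
theorem pvFold_found (ws : List String) : ∀ (s f l : Int), f ≤ l → l < s →
    (PySem.List.enumerate ws s).foldl pvStep (some f, l) =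
      (some f, ((ws.reverse.findIdx? pvP).map
                 (fun (r : Nat) => s + ((ws.length : Int) - 1 - (r : Int)))).getD l) := by
  induction ws with
  | nil => intro s f l h1 h2; simp [PySem.List.enumerate_nil]
  | cons x xs ih =>
    intro s f l h1 h2
    rw [PySem.List.enumerate_cons, List.foldl_cons]
    show (PySem.List.enumerate xs (s+1)).foldl pvStep (pvStep (some f, l) (s, x)) = _
    by_cases hx : pvP x
    · have hst : pvStep (some f, l) (s, x) = (some f, s) := by
        simp only [pvStep, hx, if_true, Prod.mk.injEq]
        exact ⟨by rw [min_eq_left (by omega)], by rw [max_eq_right (by omega)]⟩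
      rw [hst, ih (s+1) f s (by omega) (by omega)]
      rw [List.reverse_cons, List.findIdx?_append]
      cases hr : xs.reverse.findIdx? pvP with
      | none =>
        simp only [Option.none_or, List.findIdx?_cons, hx, if_true, List.findIdx?_nil,
          Option.map_none, Option.map_some, List.length_reverse, List.length_cons,
          Option.getD_some, Option.getD_none, Prod.mk.injEq, true_and]
        omega
      | some r =>
        simp only [Option.some_or, Option.map_some, Option.getD_some, List.length_cons,
          Prod.mk.injEq, true_and]
        omega
    · have hst : pvStep (some f, l) (s, x) = (some f, l) := by
        simp [pvStep, hx]
      rw [hst, ih (s+1) f l h1 (by omega)]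
      rw [List.reverse_cons, List.findIdx?_append]
      cases hr : xs.reverse.findIdx? pvP with
      | none =>
        simp [hx]
      | some r =>
        simp only [Option.some_or, Option.map_some, Option.getD_some, List.length_cons,
          Prod.mk.injEq, true_and]
        omega

-- from the initial (inf, -1) state: the fold computes the first and last matching indices
theorem pvFold_start (ws : List String) : ∀ (s : Int), 0 ≤ s →
    (PySem.List.enumerate ws s).foldl pvStep (none, -1) =
      ((ws.findIdx? pvP).map (fun (j : Nat) => s + (j : Int)),
       ((ws.reverse.findIdx? pvP).map
         (fun (r : Nat) => s + ((ws.length : Int) - 1 - (r : Int)))).getD (-1)) := by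
  induction ws with
  | nil => intro s _; simp [PySem.List.enumerate_nil]
  | cons x xs ih =>
    intro s hs
    rw [PySem.List.enumerate_cons, List.foldl_cons]
    show (PySem.List.enumerate xs (s+1)).foldl pvStep (pvStep (none, -1) (s, x)) = _
    by_cases hx : pvP x
    · have hst : pvStep (none, -1) (s, x) = (some s, s) := by
        simp only [pvStep, hx, if_true, Prod.mk.injEq, true_and]
        rw [max_eq_right (by omega)]
      rw [hst, pvFold_found xs (s+1) s s (le_refl s) (by omega)]
      rw [List.reverse_cons, List.findIdx?_append, List.findIdx?_cons]
      simp only [hx, if_true]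
      cases hr : xs.reverse.findIdx? pvP with
      | none =>
        simp only [Option.none_or, List.findIdx?_cons, hx, if_true, List.findIdx?_nil,
          Option.map_none, Option.map_some, List.length_reverse, List.length_cons,
          Option.getD_some, Option.getD_none, Prod.mk.injEq, Option.some.injEq]
        omega
      | some r =>
        simp only [Option.some_or, Option.map_some, Option.getD_some, List.length_cons,
          Prod.mk.injEq, Option.some.injEq]
        omega
    · have hst : pvStep (none, -1) (s, x) = (none, -1) := by
        simp [pvStep, hx]
      rw [hst, ih (s+1) (by omega)]
      rw [List.reverse_cons, List.findIdx?_append, List.findIdx?_cons]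
      simp only [hx, Bool.false_eq_true, if_false]
      cases hj : xs.findIdx? pvP with
      | none =>
        have hrn : xs.reverse.findIdx? pvP = none := by
          rw [List.findIdx?_eq_none_iff] at hj ⊢
          intro y hy; exact hj y (List.mem_reverse.mp hy)
        simp [hrn, hx]
      | some j =>
        obtain ⟨r, hr⟩ := pvRev_some hj
        simp only [hr, Option.map_some, Option.some_or, Option.getD_some, List.length_cons,
          Prod.mk.injEq, Option.some.injEq]
        omega

-- ===== VERDICT (by name: the statement is the Claim_ definition above) =====
theorem analyze_question_product_spec : Claim_equal_analyze_question_product := by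
  unfold Claim_equal_analyze_question_product Spec_analyze_question_product
  intro question _
  unfold analyze_question_product analyze_question_product_alt
  rw [show (fun w => pvKeywords.contains w) = pvP from rfl]
  generalize PySem.Str.split₀ (PySem.Str.lower question) = words
  show (match ((PySem.List.enumerate words 0).foldl pvStep (none, -1)).1 with
        | none => ([] : List String)
        | some f =>
          PySem.List.slice words (some f)
            (some (((PySem.List.enumerate words 0).foldl pvStep (none, -1)).2 + 1))) = _
  rw [pvFold_start words 0 (le_refl 0)]
  cases hj : words.findIdx? pvP with
  | none => simp only [hj, Option.map_none]
  | some j =>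
    obtain ⟨r, hr⟩ := pvRev_some hj
    have hrlt : r < words.length := by
      have := pvFindIdx?_lt hr; simpa using this
    simp only [hj, hr, Option.map_some, Option.getD_some]
    have e1 : (0 : Int) + (j : Int) = (j : Int) := by omega
    have e2 : (0 : Int) + ((words.length : Int) - 1 - (r : Int)) + 1 =
        ((words.length - 1 - r : Nat) : Int) + 1 := by omega
    rw [e1, e2]
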